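-- pv_equiv track=rewrite | github.com/hyeongyun0916/Algorithm | temp/3.py | count_repeated_substring
-- ===== SOURCE A (Python) =====
-- def count_repeated_substring(S):
--     count = 0
--     len_s = len(S)
--     for i in range(1, len_s, 2):
--         len_substr = i+1
--         j = 0
--         while j + len_substr <= len_s:
--             sub_str = S[j:j + len_substr]
--             if sub_str[:len_substr // 2] == sub_str[len_substr // 2:]:
--                 count += 1
--             j += len_substr // 2
--         j = 1
--         while j + len_substr <= len_s:
--             sub_str = S[j:j + len_substr]
--             if sub_str[:len_substr // 2] == sub_str[len_substr // 2:]: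
--                 count += 1
--             j += len_substr // 2
--     return count
-- ===== SOURCE B (Python) =====
-- def count_repeated_substring(S):
--     n = len(S)
--     total = 0
--     for h in range(1, n // 2 + 1):
--         # run[j] = length of the longest block starting at j that matches the
--         # block h positions later, computed right-to-left by dynamic programming;
--         # then S[j:j+h] == S[j+h:j+2*h] iff run[j] >= h.
--         m = n - h
--         run = [0] * (m + 1)
--         for j in reversed(range(m)):
--             run[j] = run[j + 1] + 1 if S[j] == S[j + h] else 0
--         j = 0
--         while j + 2 * h <= n:
--             if run[j] >= h:
--                 total += 1
--             j += h
--         j = 1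
--         while j + 2 * h <= n:
--             if run[j] >= h:
--                 total += 1
--             j += h
--     return total
-- ===== Notes on version B (the rewrite author's own statement) =====
-- stated objective: alternative
-- what changed: Per half-length h, A re-extracts each window and compares its two halves by slicing; B instead builds a right-to-left dynamic-programming run array (run[j] = length of the block at j matching the block h later) once per h and decides each strided position by a single comparison run[j] >= h.
import Mathlib
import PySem

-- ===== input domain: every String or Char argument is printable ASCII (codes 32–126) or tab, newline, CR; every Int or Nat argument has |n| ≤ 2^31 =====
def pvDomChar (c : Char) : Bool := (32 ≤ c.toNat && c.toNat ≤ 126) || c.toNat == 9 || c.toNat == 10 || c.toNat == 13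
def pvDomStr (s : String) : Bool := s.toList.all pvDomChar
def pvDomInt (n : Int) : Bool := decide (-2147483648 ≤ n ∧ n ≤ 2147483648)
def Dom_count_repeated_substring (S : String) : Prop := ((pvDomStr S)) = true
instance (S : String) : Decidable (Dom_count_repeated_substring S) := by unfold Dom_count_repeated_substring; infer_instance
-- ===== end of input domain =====

-- B replaces A's per-position slice comparison by a right-to-left dynamic-programming
-- run array (run[j] = length of the block at j matching the block h later), an
-- alternative algorithm of the same asymptotic cost.

-- ===== PORT A =====
-- the Python 'while' loop; fuel only makes it total (len_s + 2 always suffices, j grows by ≥ 1)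
def pvLoopA (s : List Char) (len_s : Nat) (len_substr : Int) : Nat → Int → Int → Int
  | 0, _, count => count
  | fuel + 1, j, count =>
    if j + len_substr ≤ (len_s : Int) then
      let sub_str := PySem.List.slice s (some j) (some (j + len_substr))
      let count' := if PySem.List.slice sub_str none (some (PySem.Int.floordiv len_substr 2))
                      = PySem.List.slice sub_str (some (PySem.Int.floordiv len_substr 2)) none
                    then count + 1 else count
      pvLoopA s len_s len_substr fuel (j + PySem.Int.floordiv len_substr 2) count'
    else count

def count_repeated_substring (S : String) : Int :=
  let s := S.toList
  let len_s := s.length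
  (PySem.List.pyRange 1 (len_s : Int) 2).foldl
    (fun count i =>
      let len_substr : Int := i + 1
      let count := pvLoopA s len_s len_substr (len_s + 2) 0 count
      pvLoopA s len_s len_substr (len_s + 2) 1 count) 0

-- ===== PORT B =====
-- Source B's run array, built back-to-front (the foldr is the 'for j in reversed(range(m))' loop);
-- S[j] and S[j+h] are read only in range, ported as getD (exact there)
def pvBuildRun (s : List Char) (h : Nat) : List Nat :=
  (List.range (s.length - h)).foldr
    (fun j acc => (if s.getD j ' ' = s.getD (j + h) ' ' then acc.headD 0 + 1 else 0) :: acc) [0]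

-- Source B's scan 'while j + 2*h <= n'; fuel only makes it total (n + 2 always suffices)
def pvLoopB (run : List Nat) (n h : Nat) : Nat → Nat → Int → Int
  | 0, _, total => total
  | fuel + 1, j, total =>
    if j + 2 * h ≤ n then
      pvLoopB run n h fuel (j + h) (if h ≤ run.getD j 0 then total + 1 else total)
    else total

def count_repeated_substring_alt (S : String) : Int :=
  let s := S.toList
  let n := s.length
  (PySem.List.pyRange 1 (PySem.Int.floordiv (n : Int) 2 + 1) 1).foldl
    (fun total h =>
      let hn := h.toNat
      let run := pvBuildRun s hn
      let total := pvLoopB run n hn (n + 2) 0 total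
      pvLoopB run n hn (n + 2) 1 total) 0

-- ===== PRECONDITION & SPEC =====
def Spec_count_repeated_substring (S : String) (out : Int) : Prop := out = count_repeated_substring_alt S
instance (S : String) (out : Int) : Decidable (Spec_count_repeated_substring S out) := by unfold Spec_count_repeated_substring; infer_instance

-- ===== CLAIM (what is proved, stated in full; the proofs are below) =====
def Claim_equal_count_repeated_substring : Prop := ∀ (S : String), Dom_count_repeated_substring S → Spec_count_repeated_substring S (count_repeated_substring S)

-- ===== LEMMAS AND PROOFS =====

-- run[j] as a function: length of the longest common block of s at j and at j+h
def runVal (s : List Char) (h : Nat) (j : Nat) : Nat :=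
  if hj : j < s.length - h then
    (if s.getD j ' ' = s.getD (j + h) ' ' then runVal s h (j + 1) + 1 else 0)
  else 0
termination_by s.length - h - j
decreasing_by omega

lemma buildRun_aux (s : List Char) (h : Nat) :
    ∀ (len k : Nat), k + len = s.length - h →
      (List.range' k len).foldr
        (fun j acc => (if s.getD j ' ' = s.getD (j + h) ' ' then acc.headD 0 + 1 else 0) :: acc) [0]
      = (List.range' k len).map (runVal s h) ++ [0] := by
  intro len
  induction len with
  | zero => intro k _; simp
  | succ l ih =>
    intro k hk
    rw [List.range'_succ]
    simp only [List.foldr_cons, List.map_cons, List.cons_append]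
    rw [ih (k + 1) (by omega)]
    have hhead : (((List.range' (k + 1) l).map (runVal s h)) ++ [0]).headD 0 = runVal s h (k + 1) := by
      cases l with
      | zero =>
        have : ¬ (k + 1 < s.length - h) := by omega
        rw [runVal, dif_neg this]; simp
      | succ l' => rw [List.range'_succ]; simp
    rw [hhead]
    have hklt : k < s.length - h := by omega
    rw [show runVal s h k = if s.getD k ' ' = s.getD (k + h) ' ' then runVal s h (k + 1) + 1 else 0 by
      rw [runVal, dif_pos hklt]]

lemma buildRun_getD (s : List Char) (h : Nat) (j : Nat) (hj : j ≤ s.length - h) :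
    (pvBuildRun s h).getD j 0 = runVal s h j := by
  unfold pvBuildRun
  rw [List.range_eq_range', buildRun_aux s h (s.length - h) 0 (by omega)]
  rcases Nat.lt_or_ge j (s.length - h) with hlt | hge
  · have hjlen : j < ((List.range' 0 (s.length - h)).map (runVal s h)).length := by
      simpa using hlt
    rw [List.getD_append _ _ _ _ hjlen, List.getD_eq_getElem _ _ hjlen]
    simp
  · have hje : j = s.length - h := by omega
    subst hje
    have hlen : ((List.range' 0 (s.length - h)).map (runVal s h)).length = s.length - h := by simp
    rw [List.getD_append_right _ _ _ _ (by omega), hlen]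
    simp [runVal]

lemma runVal_ge_iff (s : List Char) (h : Nat) :
    ∀ (t j : Nat), j + h + t ≤ s.length →
      (t ≤ runVal s h j ↔ List.take t (List.drop j s) = List.take t (List.drop (j + h) s)) := by
  intro t
  induction t with
  | zero => intro j _; simp
  | succ t ih =>
    intro j hb
    have hj : j < s.length - h := by omega
    have hjl : j < s.length := by omega
    have hjh : j + h < s.length := by omega
    rw [runVal, dif_pos hj]
    rw [List.drop_eq_getElem_cons hjl, List.drop_eq_getElem_cons hjh,
        List.take_succ_cons, List.take_succ_cons]
    have hgd1 : s.getD j ' ' = s[j] := List.getD_eq_getElem s ' ' hjl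
    have hgd2 : s.getD (j + h) ' ' = s[j + h] := List.getD_eq_getElem s ' ' hjh
    have ihs := ih (j + 1) (by omega)
    by_cases heq : s.getD j ' ' = s.getD (j + h) ' '
    · rw [if_pos heq]
      have hheads : s[j] = s[j + h] := by rw [← hgd1, ← hgd2, heq]
      constructor
      · intro hle
        have ht : t ≤ runVal s h (j + 1) := by omega
        have htail := ihs.mp ht
        rw [show j + 1 + h = j + h + 1 by omega] at htail
        rw [hheads, htail]
      · intro hcons
        have htails : List.take t (List.drop (j + 1) s) = List.take t (List.drop (j + 1 + h) s) := by
          rw [show j + 1 + h = j + h + 1 by omega]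
          exact List.tail_eq_of_cons_eq hcons
        have := ihs.mpr htails
        omega
    · rw [if_neg heq]
      constructor
      · omega
      · intro hcons
        have hheads := List.head_eq_of_cons_eq hcons
        rw [← hgd1, ← hgd2] at hheads
        exact absurd hheads heq

lemma cond_iff (s : List Char) (h j : Nat) (hbound : j + 2 * h ≤ s.length) :
    ((List.take (2 * h) (List.drop j s)).take h = (List.take (2 * h) (List.drop j s)).drop h)
    ↔ h ≤ (pvBuildRun s h).getD j 0 := by
  rw [buildRun_getD s h j (by omega)]
  rw [List.take_take, Nat.min_eq_left (by omega)]
  rw [List.drop_take, List.drop_drop]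
  have h1 : 2 * h - h = h := by omega
  rw [h1]
  exact (runVal_ge_iff s h h j (by omega)).symm

lemma loops_agree (s : List Char) (h : Nat) :
    ∀ (fuel j : Nat) (c : Int),
      pvLoopA s s.length ((2 * h : Nat) : Int) fuel ((j : Nat) : Int) c
        = pvLoopB (pvBuildRun s h) s.length h fuel j c := by
  intro fuel
  induction fuel with
  | zero => intro j c; rfl
  | succ f ih =>
    intro j c
    have hfd : PySem.Int.floordiv ((2 * h : Nat) : Int) 2 = (h : Int) := by
      rw [PySem.Int.floordiv_eq_ediv_of_pos (by norm_num)]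
      push_cast
      omega
    rw [pvLoopA, pvLoopB]
    by_cases hg : j + 2 * h ≤ s.length
    · rw [if_pos (by push_cast; omega), if_pos hg]
      have hslice : PySem.List.slice s (some ((j : Nat) : Int)) (some (((j : Nat) : Int) + ((2 * h : Nat) : Int)))
          = List.take (2 * h) (List.drop j s) := PySem.List.slice_natCast_add s j (2 * h)
      have hcond :
          (PySem.List.slice (List.take (2 * h) (List.drop j s)) none (some ((h : Nat) : Int))
            = PySem.List.slice (List.take (2 * h) (List.drop j s)) (some ((h : Nat) : Int)) none)
          ↔ h ≤ (pvBuildRun s h).getD j 0 := by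
        rw [PySem.List.slice_to_natCast, PySem.List.slice_from_natCast]
        exact cond_iff s h j hg
      simp only [hfd, hslice]
      rw [show ((j : Nat) : Int) + (h : Int) = (((j + h : Nat)) : Int) by push_cast; ring]
      rw [← ih (j + h)]
      congr 1
      by_cases hc : h ≤ (pvBuildRun s h).getD j 0
      · rw [if_pos (hcond.mpr hc), if_pos hc]
      · rw [if_neg (fun hx => hc (hcond.mp hx)), if_neg hc]
    · rw [if_neg (by push_cast; omega), if_neg hg]

lemma range_odd (n : Nat) :
    PySem.List.pyRange 1 (n : Int) 2
      = (PySem.List.pyRange 1 ((n : Int) / 2 + 1) 1).map (fun h => 2 * h - 1) := by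
  rw [PySem.List.pyRange_of_pos 1 (n : Int) (by norm_num),
      PySem.List.pyRange_of_pos 1 ((n : Int) / 2 + 1) (by norm_num), List.map_map]
  have hlen : (if (1 : Int) < (n : Int) then (((n : Int) - 1 + 2 - 1) / 2).toNat else 0)
      = (if (1 : Int) < (n : Int) / 2 + 1 then (((n : Int) / 2 + 1 - 1 + 1 - 1) / 1).toNat else 0) := by
    split_ifs with h1 h2 h2 <;> omega
  rw [hlen]
  apply List.map_congr_left
  intro k _
  simp only [Function.comp_apply]
  ring

-- ===== VERDICT (by name: the statement is the Claim_ definition above) =====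
theorem count_repeated_substring_spec : Claim_equal_count_repeated_substring := by
  intro S _
  unfold Spec_count_repeated_substring count_repeated_substring count_repeated_substring_alt
  simp only []
  rw [PySem.Int.floordiv_eq_ediv_of_pos (by norm_num : (0:Int) < 2)]
  rw [range_odd, List.foldl_map]
  apply PySem.List.foldl_congr_mem
  intro acc h hmem
  rw [PySem.List.mem_pyRange_one] at hmem
  obtain ⟨h1, h2⟩ := hmem
  have hcast : h = ((h.toNat : Nat) : Int) := by omega
  have hsub : 2 * h - 1 + 1 = ((2 * h.toNat : Nat) : Int) := by push_cast; omega
  rw [hsub]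
  rw [show (0 : Int) = ((0 : Nat) : Int) by rfl, loops_agree S.toList h.toNat (S.toList.length + 2) 0 acc]
  rw [show (1 : Int) = ((1 : Nat) : Int) by rfl, loops_agree S.toList h.toNat (S.toList.length + 2) 1 _]
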